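-- pv_equiv track=rewrite | github.com/SriAthishya/miscellaneous | Python/4-4.30/day2defs.py | stringee
-- ===== SOURCE A (Python) =====
-- def stringee(str10):
--     lt=[]
--     for i in range(0,len(str10)):
--         if str10[i] in "aeiou":
--             lt.append(i)
--     j=max(lt)+1
--     str12=str10[j:]
--     return(str12)
-- ===== SOURCE B (Python) =====
-- def stringee(str10):
--     for i in range(len(str10) - 1, -1, -1):
--         if str10[i] in "aeiou":
--             return str10[i + 1:]
--     raise ValueError("max() arg is an empty sequence")
-- ===== Notes on version B (the rewrite author's own statement) =====
-- stated objective: simpler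
-- what changed: B replaces A's forward pass that collects all vowel indices into a list followed by max() and a slice with a single early-exit reverse scan that returns the suffix at the first vowel found from the right (raising ValueError, like A's max([]), when the string has no vowel).
import Mathlib
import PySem

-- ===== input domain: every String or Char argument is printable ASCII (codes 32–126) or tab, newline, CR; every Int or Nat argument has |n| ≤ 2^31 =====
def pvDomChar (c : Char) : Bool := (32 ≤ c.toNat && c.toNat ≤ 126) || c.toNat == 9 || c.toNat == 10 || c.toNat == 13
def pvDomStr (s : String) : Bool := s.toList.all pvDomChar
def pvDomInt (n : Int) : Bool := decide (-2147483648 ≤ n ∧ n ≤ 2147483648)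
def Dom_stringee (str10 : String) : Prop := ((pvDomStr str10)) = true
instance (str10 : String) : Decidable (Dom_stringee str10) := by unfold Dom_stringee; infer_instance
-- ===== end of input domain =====

-- B replaces A's collect-all-vowel-indices-then-max pass with a single early-exit
-- reverse scan returning the suffix after the first vowel found from the right (simpler).


-- ===== PORT A =====
-- lt = []; for i in range(0, len(str10)): if str10[i] in "aeiou": lt.append(i)
def stringeeFold (cs : List Char) (n : Nat) : List Int :=
  (PySem.List.pyRange 0 (n : Int) 1).foldl
    (fun lt i => if PySem.List.pyGetD cs i ' ' ∈ ['a', 'e', 'i', 'o', 'u'] then lt ++ [i] else lt) []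

def stringee (str10 : String) : String :=
  match PySem.List.max? (stringeeFold str10.toList str10.toList.length) (fun x => x) with
  | none   => ""  -- Python: max([]) raises ValueError; excluded by Pre_stringee
  | some m => String.ofList (PySem.List.slice str10.toList (some (m + 1)) none)   -- str10[j:]

-- ===== PORT B =====
-- for i in range(len(str10)-1, -1, -1): if str10[i] in "aeiou": return str10[i+1:]
-- the Nat argument is the number of indices still to scan; index i = argument - 1
def stringeeAltGo (cs : List Char) : Nat → Option (List Char)
  | 0 => none
  | n + 1 =>
    if PySem.List.pyGetD cs (n : Int) ' ' ∈ ['a', 'e', 'i', 'o', 'u'] then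
      some (PySem.List.slice cs (some ((n : Int) + 1)) none)
    else stringeeAltGo cs n

def stringee_alt (str10 : String) : String :=
  match stringeeAltGo str10.toList str10.toList.length with
  | some r => String.ofList r
  | none   => ""  -- B raises ValueError here; excluded by Pre_stringee

-- ===== PRECONDITION & SPEC =====
-- Pre_ excludes strings without a lowercase vowel: there Python A raises ValueError (max of empty list), and B raises too.
def Pre_stringee (str10 : String) : Prop :=
  (str10.toList.any (fun c => ['a', 'e', 'i', 'o', 'u'].contains c)) = true
instance (str10 : String) : Decidable (Pre_stringee str10) := by unfold Pre_stringee; infer_instance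

def pvWitness_stringee : String := "a"

def Spec_stringee (str10 : String) (out : String) : Prop := out = stringee_alt str10
instance (str10 : String) (out : String) : Decidable (Spec_stringee str10 out) := by unfold Spec_stringee; infer_instance

-- ===== CLAIM (what is proved, stated in full; the proofs are below) =====
def Claim_equal_stringee : Prop := ∀ (str10 : String), Dom_stringee str10 → Pre_stringee str10 → Spec_stringee str10 (stringee str10)

-- ===== LEMMAS AND PROOFS =====

-- greatest index i < n with property p, the common characterisation of both loops
def pvGmax (p : Nat → Prop) [DecidablePred p] : Nat → Option Nat
  | 0 => none
  | n + 1 => if p n then some n else pvGmax p n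

theorem pvGmax_lt (p : Nat → Prop) [DecidablePred p] (n m : Nat)
    (h : pvGmax p n = some m) : m < n := by
  induction n with
  | zero => simp [pvGmax] at h
  | succ k ih =>
    unfold pvGmax at h
    split at h
    · cases h; omega
    · exact Nat.lt_succ_of_lt (ih h)

-- B-side characterisation
theorem altGo_eq (cs : List Char) (n : Nat) :
    stringeeAltGo cs n
      = (pvGmax (fun i => PySem.List.pyGetD cs (i : Int) ' ' ∈ ['a','e','i','o','u']) n).map
          (fun m => PySem.List.slice cs (some ((m : Int) + 1)) none) := by
  induction n with
  | zero => rfl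
  | succ k ih =>
    unfold stringeeAltGo pvGmax
    rw [ih]
    by_cases hp : PySem.List.pyGetD cs (k : Int) ' ' ∈ ['a','e','i','o','u']
    · rw [if_pos hp, if_pos hp]; rfl
    · rw [if_neg hp, if_neg hp]

-- A-side: the fold collects exactly the vowel indices and its max is pvGmax
theorem fold_succ (cs : List Char) (n : Nat) :
    stringeeFold cs (n + 1)
      = if PySem.List.pyGetD cs (n : Int) ' ' ∈ ['a','e','i','o','u']
        then stringeeFold cs n ++ [(n : Int)] else stringeeFold cs n := by
  unfold stringeeFold
  have hc : (((n + 1 : Nat)) : Int) = (n : Int) + 1 := by push_cast; ring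
  rw [hc, PySem.List.pyRange_one_succ_right (by omega : (0:Int) ≤ (n : Int)), List.foldl_append]
  simp

theorem fold_max (cs : List Char) (n : Nat) :
    PySem.List.max? (stringeeFold cs n) (fun x => x)
      = Option.map (fun m : Nat => (m : Int))
          (pvGmax (fun i => PySem.List.pyGetD cs (i : Int) ' ' ∈ ['a','e','i','o','u']) n) ∧
    ∀ y ∈ stringeeFold cs n, y < (n : Int) := by
  induction n with
  | zero =>
    constructor
    · rfl
    · intro y hy; simp [stringeeFold, PySem.List.pyRange_one_eq_nil] at hy
  | succ k ih =>
    obtain ⟨ihm, ihb⟩ := ih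
    rw [fold_succ]
    unfold pvGmax
    by_cases hp : PySem.List.pyGetD cs (k : Int) ' ' ∈ ['a','e','i','o','u']
    · simp only [if_pos hp]
      constructor
      · -- max of (old list ++ [k]) = k since all old elements < k
        cases hlt : stringeeFold cs k with
        | nil => simp [PySem.List.max?]
        | cons y t =>
          have : (y :: t) ++ [(k : Int)] = y :: (t ++ [(k : Int)]) := rfl
          rw [this, PySem.List.max?_id_cons, List.foldl_append]
          rw [hlt, PySem.List.max?_id_cons] at ihm
          cases hg : pvGmax (fun i => PySem.List.pyGetD cs (i : Int) ' ' ∈ ['a','e','i','o','u']) k with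
          | none => rw [hg] at ihm; simp at ihm
          | some m =>
            rw [hg] at ihm
            have hmk : (m : Int) < (k : Int) := by
              exact_mod_cast pvGmax_lt _ _ _ hg
            simp only [Option.map_some, Option.some.injEq] at ihm ⊢
            simp only [List.foldl_cons, List.foldl_nil, ihm]
            omega
      · intro y hy
        rcases List.mem_append.mp hy with h | h
        · have := ihb y h; omega
        · simp at h; omega
    · simp only [if_neg hp]
      exact ⟨ihm, fun y hy => by have := ihb y hy; omega⟩

-- ===== VERDICT (by name: the statement is the Claim_ definition above) =====
theorem stringee_spec : Claim_equal_stringee := by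
  intro str10 _ _
  unfold Spec_stringee stringee stringee_alt
  rw [(fold_max str10.toList str10.toList.length).1, altGo_eq]
  cases pvGmax (fun i => PySem.List.pyGetD str10.toList (i : Int) ' ' ∈ ['a','e','i','o','u'])
      str10.toList.length <;> simp
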